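-- pv_equiv track=rewrite | github.com/gem5/gem5 | src/arch/isa_parser.py | makeFlagConstructor
-- ===== SOURCE A (Python) =====
-- def makeFlagConstructor(flag_list):
--     if len(flag_list) == 0:
--         return ''
--     # filter out repeated flags
--     flag_list.sort()
--     i = 1
--     while i < len(flag_list):
--         if flag_list[i] == flag_list[i-1]:
--             del flag_list[i]
--         else:
--             i += 1
--     pre = '\n\tflags['
--     post = '] = true;'
--     code = pre + (post + pre).join(flag_list) + post
--     return code
-- ===== SOURCE B (Python) =====
-- def _merge_unique(a, b):
--     # merge two strictly increasing lists, dropping duplicates across them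
--     out = []
--     i = j = 0
--     while i < len(a) and j < len(b):
--         if a[i] < b[j]:
--             out.append(a[i]); i += 1
--         elif b[j] < a[i]:
--             out.append(b[j]); j += 1
--         else:
--             out.append(a[i]); i += 1; j += 1
--     out.extend(a[i:])
--     out.extend(b[j:])
--     return out
--
-- def _msort_unique(xs):
--     # divide-and-conquer: each half is strictly increasing; duplicates vanish in the merge
--     if len(xs) <= 1:
--         return xs
--     mid = len(xs) // 2
--     return _merge_unique(_msort_unique(xs[:mid]), _msort_unique(xs[mid:]))
--
-- def makeFlagConstructor(flag_list):
--     flag_list[:] = _msort_unique(flag_list)  # same in-place mutation as A: sorted unique contents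
--     return ''.join('\n\tflags[%s] = true;' % f for f in flag_list)
-- ===== Notes on version B (the rewrite author's own statement) =====
-- stated objective: alternative
-- what changed: Replaces library sort followed by an in-place adjacent while/del dedup pass with a hand-written divide-and-conquer merge sort whose merge step drops duplicates as it compares the two halves, and builds the result by joining one per-flag chunk instead of the pre/post interleave with an empty-list guard.
import Mathlib
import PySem

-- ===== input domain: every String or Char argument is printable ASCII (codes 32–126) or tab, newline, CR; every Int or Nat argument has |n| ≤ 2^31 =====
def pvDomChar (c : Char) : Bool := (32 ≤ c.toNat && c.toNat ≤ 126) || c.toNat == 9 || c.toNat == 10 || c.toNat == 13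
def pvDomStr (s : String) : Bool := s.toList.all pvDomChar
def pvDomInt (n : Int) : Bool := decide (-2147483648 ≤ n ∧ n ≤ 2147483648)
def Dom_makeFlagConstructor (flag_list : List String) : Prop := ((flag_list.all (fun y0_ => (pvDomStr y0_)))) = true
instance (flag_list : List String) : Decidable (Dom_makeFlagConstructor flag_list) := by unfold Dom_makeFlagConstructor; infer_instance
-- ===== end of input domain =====

-- B replaces A's library sort + in-place adjacent while/del dedup with a hand-written merge sort
-- that drops duplicates during the merge, and joins one per-flag chunk instead of the pre/post
-- interleave (alternative algorithm). Both Pythons mutate the argument to the same sorted unique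
-- contents; the theorems below are about the return value.

-- ===== PORT A =====
-- A's while/del loop, step for step: if flag_list[i] == flag_list[i-1] delete flag_list[i], else advance i
def pvADedup : List String → List String
  | [] => []
  | [x] => [x]
  | x :: y :: rest => if y = x then pvADedup (x :: rest) else x :: pvADedup (y :: rest)

def makeFlagConstructor (flag_list : List String) : String :=
  if flag_list.length = 0 then ""
  else
    let fl := pvADedup (PySem.List.sorted flag_list (fun x => x) false)
    let pre := "\n\tflags["
    let post := "] = true;"
    pre ++ PySem.Str.join (post ++ pre) fl ++ post

-- ===== PORT B =====
-- Source B's _merge_unique: merge two lists, dropping duplicates across them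
def pvMergeU : List String → List String → List String
  | [], b => b
  | a, [] => a
  | x :: xs, y :: ys =>
    if x < y then x :: pvMergeU xs (y :: ys)
    else if y < x then y :: pvMergeU (x :: xs) ys
    else x :: pvMergeU xs ys
termination_by a b => a.length + b.length

-- Source B's _msort_unique; xs[:mid] / xs[mid:] = take/drop (exact: 0 ≤ mid ≤ len)
def pvMSortU (xs : List String) : List String :=
  if h : xs.length ≤ 1 then xs
  else
    let mid := xs.length / 2
    pvMergeU (pvMSortU (xs.take mid)) (pvMSortU (xs.drop mid))
termination_by xs.length
decreasing_by
  · simp only [List.length_take]; omega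
  · simp only [List.length_drop]; omega

def makeFlagConstructor_alt (flag_list : List String) : String :=
  let fl := pvMSortU flag_list
  PySem.Str.join "" (fl.map (fun f => "\n\tflags[" ++ f ++ "] = true;"))

-- ===== PRECONDITION & SPEC =====
def Spec_makeFlagConstructor (flag_list : List String) (out : String) : Prop := out = makeFlagConstructor_alt flag_list
instance (flag_list : List String) (out : String) : Decidable (Spec_makeFlagConstructor flag_list out) := by unfold Spec_makeFlagConstructor; infer_instance

-- ===== CLAIM (what is proved, stated in full; the proofs are below) =====
def Claim_equal_makeFlagConstructor : Prop := ∀ (flag_list : List String), Dom_makeFlagConstructor flag_list → Spec_makeFlagConstructor flag_list (makeFlagConstructor flag_list)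

-- ===== LEMMAS AND PROOFS =====

-- A-side dedup characterisation
theorem mem_pvADedup (x : String) : ∀ (l : List String), x ∈ pvADedup l ↔ x ∈ l := by
  intro l
  fun_induction pvADedup l with
  | case1 => rfl
  | case2 => rfl
  | case3 a rest ih => simp_all
  | case4 a b rest h ih => simp_all

theorem nodup_pvADedup : ∀ (l : List String), l.Pairwise (· ≤ ·) → (pvADedup l).Pairwise (· < ·) := by
  intro l
  fun_induction pvADedup l with
  | case1 => intro _; simp
  | case2 => intro _; simp
  | case3 a rest ih =>
    intro hp
    exact ih (List.pairwise_cons.mpr ⟨fun z hz => (List.pairwise_cons.mp hp).1 z (by simp [hz]),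
      (List.pairwise_cons.mp (List.pairwise_cons.mp hp).2).2⟩)
  | case4 a b rest h ih =>
    intro hp
    have hp' : (b :: rest).Pairwise (· ≤ ·) := (List.pairwise_cons.mp hp).2
    refine List.pairwise_cons.mpr ⟨fun z hz => ?_, ih hp'⟩
    have hz' : z ∈ b :: rest := (mem_pvADedup z _).mp hz
    have hab : a < b := lt_of_le_of_ne ((List.pairwise_cons.mp hp).1 b (by simp)) (Ne.symm h)
    rcases List.mem_cons.mp hz' with rfl | hz''
    · exact hab
    · exact lt_of_lt_of_le hab ((List.pairwise_cons.mp hp').1 z hz'')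

-- B-side: membership and strict sortedness of the dedup-merge
theorem mem_pvMergeU (z : String) : ∀ (a b : List String), z ∈ pvMergeU a b ↔ z ∈ a ∨ z ∈ b := by
  intro a b
  fun_induction pvMergeU a b with
  | case1 => simp
  | case2 => simp
  | case3 x xs y ys h ih => simp_all; tauto
  | case4 x xs y ys h h' ih => simp_all; tauto
  | case5 x xs y ys h h' ih =>
    have hxy : x = y := le_antisymm (not_lt.mp h') (not_lt.mp h)
    simp_all; tauto

theorem pairwise_pvMergeU : ∀ (a b : List String), a.Pairwise (· < ·) → b.Pairwise (· < ·) →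
    (pvMergeU a b).Pairwise (· < ·) := by
  intro a b
  fun_induction pvMergeU a b with
  | case1 => intro _ hb; exact hb
  | case2 => intro ha _; exact ha
  | case3 x xs y ys h ih =>
    intro ha hb
    refine List.pairwise_cons.mpr ⟨fun z hz => ?_, ih (List.pairwise_cons.mp ha).2 hb⟩
    rcases (mem_pvMergeU z _ _).mp hz with hz | hz
    · exact (List.pairwise_cons.mp ha).1 z hz
    · rcases List.mem_cons.mp hz with rfl | hz'
      · exact h
      · exact lt_trans h ((List.pairwise_cons.mp hb).1 z hz')
  | case4 x xs y ys h h' ih =>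
    intro ha hb
    refine List.pairwise_cons.mpr ⟨fun z hz => ?_, ih ha (List.pairwise_cons.mp hb).2⟩
    rcases (mem_pvMergeU z _ _).mp hz with hz | hz
    · rcases List.mem_cons.mp hz with rfl | hz'
      · exact h'
      · exact lt_trans h' ((List.pairwise_cons.mp ha).1 z hz')
    · exact (List.pairwise_cons.mp hb).1 z hz
  | case5 x xs y ys h h' ih =>
    intro ha hb
    have hxy : x = y := le_antisymm (not_lt.mp h') (not_lt.mp h)
    refine List.pairwise_cons.mpr ⟨fun z hz => ?_, ih (List.pairwise_cons.mp ha).2 (List.pairwise_cons.mp hb).2⟩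
    rcases (mem_pvMergeU z _ _).mp hz with hz | hz
    · exact (List.pairwise_cons.mp ha).1 z hz
    · exact hxy ▸ (List.pairwise_cons.mp hb).1 z hz

theorem pvMSortU_good : ∀ (l : List String),
    (pvMSortU l).Pairwise (· < ·) ∧ ∀ z, (z ∈ pvMSortU l ↔ z ∈ l) := by
  intro l
  fun_induction pvMSortU l with
  | case1 l h =>
    interval_cases hl : l.length
    · simp [List.length_eq_zero_iff.mp hl]
    · rcases List.length_eq_one_iff.mp hl with ⟨x, rfl⟩; simp
  | case2 l h mid ih1 ih2 =>
    constructor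
    · exact pairwise_pvMergeU _ _ ih1.1 ih2.1
    · intro z
      rw [mem_pvMergeU, ih1.2, ih2.2, ← List.mem_append, List.take_append_drop]

-- the two ports compute the same sorted-unique list
theorem pvMSortU_eq_pvADedup (l : List String) :
    pvMSortU l = pvADedup (PySem.List.sorted l (fun x => x) false) := by
  have hA := nodup_pvADedup _ (PySem.List.sorted_pairwise l (fun x => x))
  have hB := pvMSortU_good l
  have hperm : (pvMSortU l).Perm (pvADedup (PySem.List.sorted l (fun x => x) false)) := by
    refine (List.perm_ext_iff_of_nodup (hB.1.imp ne_of_lt) (hA.imp ne_of_lt)).mpr ?_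
    intro z
    rw [hB.2 z, mem_pvADedup, PySem.List.mem_sorted]
  have h1 : PySem.List.sorted (pvADedup (PySem.List.sorted l (fun x => x) false)) (fun x => x) false
      = pvADedup (PySem.List.sorted l (fun x => x) false) :=
    PySem.List.sorted_eq_of_perm_of_pairwise_lt _ _ (fun x => x) (List.Perm.refl _) hA
  have h2 : PySem.List.sorted (pvADedup (PySem.List.sorted l (fun x => x) false)) (fun x => x) false
      = pvMSortU l :=
    PySem.List.sorted_eq_of_perm_of_pairwise_lt _ _ (fun x => x) hperm hB.1
  rw [← h2, h1]

-- joining per-element chunks equals the pre/post interleave, on a nonempty list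
theorem chars_join_chunks (P Q : List Char) :
    ∀ (l : List (List Char)), l ≠ [] →
      PySem.Chars.join [] (l.map (fun cs => P ++ cs ++ Q))
        = P ++ PySem.Chars.join (Q ++ P) l ++ Q := by
  intro l
  induction l with
  | nil => intro h; exact absurd rfl h
  | cons x t ih =>
    intro _
    cases t with
    | nil => simp [PySem.Chars.join, List.intercalate]
    | cons y r =>
      have hlhs : List.map (fun cs => P ++ cs ++ Q) (x :: y :: r)
          = (P ++ x ++ Q) :: (P ++ y ++ Q) :: List.map (fun cs => P ++ cs ++ Q) r := rfl
      rw [hlhs, PySem.Chars.join_cons_cons, PySem.Chars.join_cons_cons,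
        show ((P ++ y ++ Q) :: List.map (fun cs => P ++ cs ++ Q) r)
          = List.map (fun cs => P ++ cs ++ Q) (y :: r) from rfl,
        ih (by simp)]
      simp [List.append_assoc]

theorem str_join_chunks (pre post : String) :
    ∀ (l : List String), l ≠ [] →
      PySem.Str.join "" (l.map (fun f => pre ++ f ++ post))
        = pre ++ PySem.Str.join (post ++ pre) l ++ post := by
  intro l hl
  apply String.toList_injective
  simp only [PySem.Str.toList_join, String.toList_append, List.map_map]
  have h1 : (String.toList ∘ fun f => pre ++ f ++ post)
      = fun f : String => pre.toList ++ f.toList ++ post.toList := by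
    funext f; simp
  rw [h1]
  have hmain := chars_join_chunks pre.toList post.toList (l.map String.toList) (by simpa using hl)
  simp only [List.map_map] at hmain
  have h3 : ((fun cs => pre.toList ++ cs ++ post.toList) ∘ String.toList)
      = (fun f : String => pre.toList ++ f.toList ++ post.toList) := rfl
  rw [h3] at hmain
  simpa using hmain

theorem pvMSortU_ne_nil (l : List String) (hl : l ≠ []) : pvMSortU l ≠ [] := by
  rcases List.exists_mem_of_ne_nil l hl with ⟨x, hx⟩
  intro h
  have := ((pvMSortU_good l).2 x).mpr hx
  simp [h] at this

-- ===== VERDICT (by name: the statement is the Claim_ definition above) =====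
theorem makeFlagConstructor_spec : Claim_equal_makeFlagConstructor := by
  intro l _
  unfold Spec_makeFlagConstructor makeFlagConstructor makeFlagConstructor_alt
  by_cases hl : l = []
  · subst hl
    rw [if_pos (show ([] : List String).length = 0 from rfl)]
    apply String.toList_injective
    simp [pvMSortU, PySem.Str.toList_join, PySem.Chars.join_nil]
  · rw [if_neg (by simpa [List.length_eq_zero_iff] using hl)]
    rw [str_join_chunks _ _ _ (pvMSortU_ne_nil l hl), pvMSortU_eq_pvADedup]
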